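-- pv_equiv track=rewrite | github.com/duncan-r/SHIP | ship/utils/utilfunctions.py | getSEResolvedFilename
-- ===== SOURCE A (Python) =====
-- import operator
--
-- def getSEResolvedFilename(filename, se_vals):
--     """Replace a tuflow placeholder filename with the scenario/event values.
--
--     Replaces all of the placholder values (e.g. ~s1~_~e1~) in a tuflow
--     filename with the corresponding values provided in the run options string.
--     If the run options flags are not found in the filename their values will
--     be appended to the end of the string.
--
--     The setup of the returned filename is always the same:
--         - First replace all placeholders with corresponding flag values.
--         - s1 == s and e1 == e.
--         - Append additional e values to end with '_' before first and '+' before others.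
--         - Append additional s values to end with '_' before first and '+' before others.
--
--     Args:
--         filename(str): the filename to update.
--         se_vals(str): the run options string containing the 's' and
--             'e' flags and their corresponding values.
--
--     Return:
--         str - the updated filename.
--     """
--     if not 'scenario' in se_vals.keys(): se_vals['scenario'] = {}
--     if not 'event' in se_vals.keys(): se_vals['event'] = {}
--
--     # Format the key value pairs into a list and combine the scenario and
--     # event list together and sort them into e, e1, e2, s, s1, s2 order.
--     scen_keys = ['-' + a for a in se_vals['scenario'].keys()]
--     scen_vals = se_vals['scenario'].values()
--     event_keys = ['-' + a for a in se_vals['event'].keys()]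
--     event_vals = se_vals['event'].values()
--     scen = [list(a) for a in zip(scen_keys, scen_vals)]
--     event = [list(a) for a in zip(event_keys, event_vals)]
--     se_vals = scen + event
--     vals = sorted(se_vals, key=operator.itemgetter(0))
--
--     # Build a new filename by replacing or adding the flag values
--     outname = filename
--     in_e = False
--     for v in vals:
--         placeholder = ''.join(['~', v[0][1:], '~'])
--
--         if placeholder in filename:
--             outname = outname.replace(placeholder, v[1])
--         elif v[0] == '-e1' and '~e~' in filename and not '-e' in se_vals:
--             outname = outname.replace('~e~', v[1])
--         elif v[0] == '-s1' and '~s~' in filename and not '-s' in se_vals: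
--             outname = outname.replace('~s~', v[1])
--         #DEBUG - CHECK THIS IS TRUE!
--         elif v[0] == '-e' and '~e1~' in filename:
--             outname = outname.replace('~e1~', v[1])
--         elif v[0] == '-s' and '~s1~' in filename:
--             outname = outname.replace('~s1~', v[1])
--
--         else:
--             if v[0].startswith('-e'):
--                 if not in_e:
--                     prefix = '_'
--                 else:
--                     prefix = '+'
--                 in_e = True
--             elif v[0].startswith('-s'):
--                 if in_e:
--                     prefix = '_'
--                 else:
--                     prefix = '+'
--                 in_e = False
--             outname += prefix + v[1]
--
--     return outname
-- ===== SOURCE B (Python) =====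
-- def getSEResolvedFilename(filename, se_vals):
--     """Two-phase rewrite: handle all event flags first, then all scenario
--     flags, tracking appends with booleans instead of the toggling in_e state.
--     (Mutates se_vals like the original: inserts missing 'scenario'/'event'.)"""
--     se_vals.setdefault('scenario', {})
--     se_vals.setdefault('event', {})
--
--     events = sorted((('-' + k, v) for k, v in se_vals['event'].items()),
--                     key=lambda kv: kv[0])
--     scens = sorted((('-' + k, v) for k, v in se_vals['scenario'].items()),
--                    key=lambda kv: kv[0])
--
--     outname = filename
--     e_appended = False
--     for flag, val in events:
--         ph = '~' + flag[1:] + '~'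
--         if ph in filename:
--             outname = outname.replace(ph, val)
--         elif flag == '-e1' and '~e~' in filename:
--             outname = outname.replace('~e~', val)
--         elif flag == '-e' and '~e1~' in filename:
--             outname = outname.replace('~e1~', val)
--         else:
--             outname += ('+' if e_appended else '_') + val
--             e_appended = True
--
--     first_s = True
--     for flag, val in scens:
--         ph = '~' + flag[1:] + '~'
--         if ph in filename:
--             outname = outname.replace(ph, val)
--         elif flag == '-s1' and '~s~' in filename:
--             outname = outname.replace('~s~', val)
--         elif flag == '-s' and '~s1~' in filename:
--             outname = outname.replace('~s1~', val)
--         else: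
--             outname += ('_' if (e_appended and first_s) else '+') + val
--             first_s = False
--     return outname
-- ===== Notes on version B (the rewrite author's own statement) =====
-- stated objective: alternative
-- what changed: Instead of one loop over the combined sorted flag list with a toggling in_e state and a stale 'prefix' variable, B splits the work into two phases: it sorts the event flags and the scenario flags separately (events always sort before scenarios), runs an event loop whose appends are prefixed '_' then '+', and then a scenario loop whose first append gets '_' exactly when some event was appended; the always-true "not '-e' in se_vals" membership tests are dropped.
-- outside the precondition, e.g. on getSEResolvedFilename('f', {'scenario': {'e': 'X'}, 'event': {'e': 'Y'}}): A returns 'f_X+Y', B returns 'f_Y_X'; on getSEResolvedFilename('', {'scenario': {'q': 'B'}}): A raises UnboundLocalError, B returns '+B'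
import Mathlib
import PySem

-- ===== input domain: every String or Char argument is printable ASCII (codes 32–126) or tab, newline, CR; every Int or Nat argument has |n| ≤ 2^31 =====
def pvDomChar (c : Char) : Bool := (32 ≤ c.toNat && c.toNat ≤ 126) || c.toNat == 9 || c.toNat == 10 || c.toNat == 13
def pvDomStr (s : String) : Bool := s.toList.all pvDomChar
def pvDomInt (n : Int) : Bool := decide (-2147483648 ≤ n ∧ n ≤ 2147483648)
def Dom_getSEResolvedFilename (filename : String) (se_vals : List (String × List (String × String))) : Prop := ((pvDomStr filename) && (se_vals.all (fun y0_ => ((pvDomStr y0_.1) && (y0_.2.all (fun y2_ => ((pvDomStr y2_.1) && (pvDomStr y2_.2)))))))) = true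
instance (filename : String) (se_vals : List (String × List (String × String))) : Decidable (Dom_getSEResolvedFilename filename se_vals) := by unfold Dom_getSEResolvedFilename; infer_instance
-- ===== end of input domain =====

-- B replaces A's single loop (toggling in_e / stale prefix) by an event phase then a scenario phase over
-- separately sorted flag lists; equivalence is about the RETURN value (both Pythons insert the missing
-- 'scenario'/'event' keys into the se_vals argument in place).


-- ===== PORT A =====
-- Python's `'-e' in se_vals` where se_vals is a list of [flag, value] LISTS: a str never equals
-- a 2-element list, so the test is always False (exact).
def pvStrInPairList (s : String) (l : List (String × String)) : Bool := l.any (fun _ => false)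

-- loop body of A; the state is (outname, in_e, prefix) — `prefix` models Python's leftover loop
-- variable (unbound "" at entry; Pre_ excludes the inputs where Python would read it unbound or stale).
def pvStepA (filename : String) (sePairs : List (String × String)) (st : String × Bool × String) (v : String × String) : String × Bool × String :=
  let outname := st.1
  let in_e := st.2.1
  let prefx := st.2.2
  let placeholder := PySem.Str.join "" ["~", PySem.Str.slice v.1 (some 1) none, "~"]
  if PySem.Str.isIn placeholder filename then
    (PySem.Str.replace outname placeholder v.2, in_e, prefx)
  else if v.1 == "-e1" && PySem.Str.isIn "~e~" filename && !(pvStrInPairList "-e" sePairs) then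
    (PySem.Str.replace outname "~e~" v.2, in_e, prefx)
  else if v.1 == "-s1" && PySem.Str.isIn "~s~" filename && !(pvStrInPairList "-s" sePairs) then
    (PySem.Str.replace outname "~s~" v.2, in_e, prefx)
  else if v.1 == "-e" && PySem.Str.isIn "~e1~" filename then
    (PySem.Str.replace outname "~e1~" v.2, in_e, prefx)
  else if v.1 == "-s" && PySem.Str.isIn "~s1~" filename then
    (PySem.Str.replace outname "~s1~" v.2, in_e, prefx)
  else
    let p := if PySem.Str.startswith v.1 "-e" then (true, if !in_e then "_" else "+")
             else if PySem.Str.startswith v.1 "-s" then (false, if in_e then "_" else "+")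
             else (in_e, prefx)
    (outname ++ (p.2 ++ v.2), p.1, p.2)

def getSEResolvedFilename (filename : String) (se_vals : List (String × List (String × String))) : String :=
  let d0 := PySem.Dict.ofList se_vals
  let d1 := if d0.contains "scenario" then d0 else d0.insert "scenario" []
  let d2 := if d1.contains "event" then d1 else d1.insert "event" []
  let scenario := PySem.Dict.ofList (d2.getD "scenario" [])
  let event := PySem.Dict.ofList (d2.getD "event" [])
  let scen_keys := scenario.keys.map (fun a => "-" ++ a)
  let scen_vals := scenario.values
  let event_keys := event.keys.map (fun a => "-" ++ a)
  let event_vals := event.values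
  let scen := scen_keys.zip scen_vals
  let eventL := event_keys.zip event_vals
  let sePairs := scen ++ eventL
  let vals := PySem.List.sorted sePairs (fun p => p.1) false
  (vals.foldl (pvStepA filename sePairs) (filename, false, "")).1

-- ===== PORT B =====
def pvStepE (filename : String) (st : String × Bool) (fv : String × String) : String × Bool :=
  let outname := st.1
  let eApp := st.2
  let ph := "~" ++ PySem.Str.slice fv.1 (some 1) none ++ "~"
  if PySem.Str.isIn ph filename then (PySem.Str.replace outname ph fv.2, eApp)
  else if fv.1 == "-e1" && PySem.Str.isIn "~e~" filename then (PySem.Str.replace outname "~e~" fv.2, eApp)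
  else if fv.1 == "-e" && PySem.Str.isIn "~e1~" filename then (PySem.Str.replace outname "~e1~" fv.2, eApp)
  else (outname ++ ((if eApp then "+" else "_") ++ fv.2), true)

def pvStepS (filename : String) (eApp : Bool) (st : String × Bool) (fv : String × String) : String × Bool :=
  let outname := st.1
  let firstS := st.2
  let ph := "~" ++ PySem.Str.slice fv.1 (some 1) none ++ "~"
  if PySem.Str.isIn ph filename then (PySem.Str.replace outname ph fv.2, firstS)
  else if fv.1 == "-s1" && PySem.Str.isIn "~s~" filename then (PySem.Str.replace outname "~s~" fv.2, firstS)
  else if fv.1 == "-s" && PySem.Str.isIn "~s1~" filename then (PySem.Str.replace outname "~s1~" fv.2, firstS)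
  else (outname ++ ((if eApp && firstS then "_" else "+") ++ fv.2), false)

def getSEResolvedFilename_alt (filename : String) (se_vals : List (String × List (String × String))) : String :=
  let d := ((PySem.Dict.ofList se_vals).setdefault "scenario" []).setdefault "event" []
  let events := PySem.List.sorted ((PySem.Dict.ofList (d.getD "event" [])).items.map (fun kv => ("-" ++ kv.1, kv.2))) (fun kv => kv.1) false
  let scens := PySem.List.sorted ((PySem.Dict.ofList (d.getD "scenario" [])).items.map (fun kv => ("-" ++ kv.1, kv.2))) (fun kv => kv.1) false
  let st1 := events.foldl (pvStepE filename) (filename, false)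
  let st2 := scens.foldl (pvStepS filename st1.2) (st1.1, true)
  st2.1

-- ===== PRECONDITION & SPEC =====
-- Pre_ restricts to the natural domain: every key of the 'scenario' dict starts with 's' and every key
-- of the 'event' dict starts with 'e'. Other keys can reach an append with A's `prefix` variable unbound
-- (UnboundLocalError) or stale from an earlier iteration, and can break the events-before-scenarios sort
-- order on which A's in_e toggling relies.
def Pre_getSEResolvedFilename (filename : String) (se_vals : List (String × List (String × String))) : Prop :=
  (∀ p ∈ (PySem.Dict.ofList se_vals).getD "scenario" ([] : List (String × String)), PySem.Str.startswith p.1 "s" = true) ∧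
  (∀ p ∈ (PySem.Dict.ofList se_vals).getD "event" ([] : List (String × String)), PySem.Str.startswith p.1 "e" = true)
instance (filename : String) (se_vals : List (String × List (String × String))) : Decidable (Pre_getSEResolvedFilename filename se_vals) := by unfold Pre_getSEResolvedFilename; infer_instance

def pvWitness_getSEResolvedFilename : String × (List (String × List (String × String))) :=
  ("~s1~_~e1~_run", [("scenario", [("s1", "sA"), ("s2", "sB")]), ("event", [("e1", "eC"), ("e", "eD")])])

def Spec_getSEResolvedFilename (filename : String) (se_vals : List (String × List (String × String))) (out : String) : Prop := out = getSEResolvedFilename_alt filename se_vals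
instance (filename : String) (se_vals : List (String × List (String × String))) (out : String) : Decidable (Spec_getSEResolvedFilename filename se_vals out) := by unfold Spec_getSEResolvedFilename; infer_instance

-- ===== CLAIM (what is proved, stated in full; the proofs are below) =====
def Claim_equal_getSEResolvedFilename : Prop := ∀ (filename : String) (se_vals : List (String × List (String × String))), Dom_getSEResolvedFilename filename se_vals → Pre_getSEResolvedFilename filename se_vals → Spec_getSEResolvedFilename filename se_vals (getSEResolvedFilename filename se_vals)

-- ===== LEMMAS AND PROOFS =====

-- the key of a dict entry built with '-'++k where k starts with "e" starts with "-e" (dually for "s")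
lemma pvSW_iff (a pre : String) : PySem.Str.startswith a pre = true ↔ pre.toList <+: a.toList := by
  simp [PySem.Str.startswith_eq, PySem.Chars.startswith_iff]

lemma pvDashE (k : String) (h : PySem.Str.startswith k "e" = true) :
    PySem.Str.startswith ("-" ++ k) "-e" = true := by
  rw [pvSW_iff] at h ⊢
  obtain ⟨t, ht⟩ := h
  refine ⟨t, ?_⟩
  simp at ht ⊢
  simp [← ht]

lemma pvDashS (k : String) (h : PySem.Str.startswith k "s" = true) :
    PySem.Str.startswith ("-" ++ k) "-s" = true := by
  rw [pvSW_iff] at h ⊢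
  obtain ⟨t, ht⟩ := h
  refine ⟨t, ?_⟩
  simp at ht ⊢
  simp [← ht]

lemma pvEShape (v : String) (h : PySem.Str.startswith v "-e" = true) :
    ∃ t, v.toList = '-' :: 'e' :: t := by
  rw [pvSW_iff] at h
  obtain ⟨t, ht⟩ := h
  exact ⟨t, by simpa using ht.symm⟩

lemma pvSShape (v : String) (h : PySem.Str.startswith v "-s" = true) :
    ∃ t, v.toList = '-' :: 's' :: t := by
  rw [pvSW_iff] at h
  obtain ⟨t, ht⟩ := h
  exact ⟨t, by simpa using ht.symm⟩

-- every "-e…" flag sorts strictly before every "-s…" flag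
lemma pvELtS (a b : String) (ha : PySem.Str.startswith a "-e" = true)
    (hb : PySem.Str.startswith b "-s" = true) : a < b := by
  obtain ⟨t, ht⟩ := pvEShape a ha
  obtain ⟨u, hu⟩ := pvSShape b hb
  rw [String.lt_iff_toList_lt, ht, hu]
  exact List.Lex.cons (List.Lex.rel (by decide))

-- facts simp uses to discharge the scenario guards for an event flag
lemma pvEFacts (v : String) (h : PySem.Str.startswith v "-e" = true) :
    (v == "-s1") = false ∧ (v == "-s") = false ∧ PySem.Str.startswith v "-s" = false := by
  obtain ⟨t, ht⟩ := pvEShape v h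
  refine ⟨?_, ?_, ?_⟩
  · apply beq_eq_false_iff_ne.mpr; intro hv; rw [hv] at ht; simp at ht
  · apply beq_eq_false_iff_ne.mpr; intro hv; rw [hv] at ht; simp at ht
  · rw [Bool.eq_false_iff]; intro hs
    obtain ⟨u, hu⟩ := pvSShape v hs
    rw [ht] at hu; simp at hu

lemma pvSFacts (v : String) (h : PySem.Str.startswith v "-s" = true) :
    (v == "-e1") = false ∧ (v == "-e") = false ∧ PySem.Str.startswith v "-e" = false := by
  obtain ⟨t, ht⟩ := pvSShape v h
  refine ⟨?_, ?_, ?_⟩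
  · apply beq_eq_false_iff_ne.mpr; intro hv; rw [hv] at ht; simp at ht
  · apply beq_eq_false_iff_ne.mpr; intro hv; rw [hv] at ht; simp at ht
  · rw [Bool.eq_false_iff]; intro hs
    obtain ⟨u, hu⟩ := pvEShape v hs
    rw [ht] at hu; simp at hu

lemma pvStrInPairList_false (s : String) (l : List (String × String)) :
    pvStrInPairList s l = false := by
  simp [pvStrInPairList]

-- A's placeholder (''.join) is B's placeholder (concatenation)
lemma pvPh_eq (x : String) :
    PySem.Str.join "" ["~", x, "~"] = "~" ++ x ++ "~" := by
  apply String.toList_injective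
  simp only [PySem.Str.join, String.toList_empty, List.map_cons, String.reduceToList, List.map_nil]
  rw [PySem.Chars.join_cons_cons, PySem.Chars.join_cons_cons, PySem.Chars.join_singleton]
  simp

-- one event flag: A's step is B's event step (the prefix slot is irrelevant)
lemma pvStepA_e (f : String) (sp : List (String × String)) (v : String × String)
    (o : String) (b : Bool) (pr : String) (hv : PySem.Str.startswith v.1 "-e" = true) :
    pvStepA f sp (o, b, pr) v
      = ((pvStepE f (o, b) v).1, (pvStepE f (o, b) v).2, (pvStepA f sp (o, b, pr) v).2.2) := by
  obtain ⟨h1, h2, h3⟩ := pvEFacts v.1 hv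
  refine Prod.ext ?_ (Prod.ext ?_ rfl)
  all_goals
    simp only [pvStepA, pvStepE, pvPh_eq, pvStrInPairList_false, h1, h2, h3, hv,
      Bool.not_false, Bool.and_true, Bool.false_and]
    split_ifs <;> simp_all

-- one scenario flag: A's step from in_e = b0 && fs is B's scenario step
lemma pvStepA_s (f : String) (sp : List (String × String)) (v : String × String)
    (o : String) (b0 fs : Bool) (pr : String) (hv : PySem.Str.startswith v.1 "-s" = true) :
    pvStepA f sp (o, b0 && fs, pr) v
      = ((pvStepS f b0 (o, fs) v).1, b0 && (pvStepS f b0 (o, fs) v).2,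
         (pvStepA f sp (o, b0 && fs, pr) v).2.2) := by
  obtain ⟨h1, h2, h3⟩ := pvSFacts v.1 hv
  refine Prod.ext ?_ (Prod.ext ?_ rfl)
  all_goals
    simp only [pvStepA, pvStepS, pvPh_eq, pvStrInPairList_false, h1, h2, h3, hv,
      Bool.not_false, Bool.and_true, Bool.false_and]
    split_ifs <;> simp_all

-- the event phase: A's fold over the event flags is B's first loop (modulo the prefix slot)
lemma pvELoop (f : String) (sp : List (String × String)) (E : List (String × String))
    (hE : ∀ p ∈ E, PySem.Str.startswith p.1 "-e" = true) :
    ∀ (o : String) (b : Bool) (pr : String),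
      (E.foldl (pvStepA f sp) (o, b, pr)).1 = (E.foldl (pvStepE f) (o, b)).1 ∧
      (E.foldl (pvStepA f sp) (o, b, pr)).2.1 = (E.foldl (pvStepE f) (o, b)).2 := by
  induction E with
  | nil => intro o b pr; exact ⟨rfl, rfl⟩
  | cons v E ih =>
    intro o b pr
    rw [List.foldl_cons, List.foldl_cons, pvStepA_e f sp v o b pr (hE v (by simp))]
    exact ih (fun p hp => hE p (by simp [hp])) _ _ _

-- the scenario phase: A's fold, entered with in_e = b0 && fs, is B's second loop
lemma pvSLoop (f : String) (sp : List (String × String)) (b0 : Bool) (S : List (String × String))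
    (hS : ∀ p ∈ S, PySem.Str.startswith p.1 "-s" = true) :
    ∀ (o : String) (fs : Bool) (pr : String),
      (S.foldl (pvStepA f sp) (o, b0 && fs, pr)).1 = (S.foldl (pvStepS f b0) (o, fs)).1 := by
  induction S with
  | nil => intro o fs pr; rfl
  | cons v S ih =>
    intro o fs pr
    rw [List.foldl_cons, List.foldl_cons, pvStepA_s f sp v o b0 fs pr (hS v (by simp))]
    exact ih (fun p hp => hS p (by simp [hp])) _ _ _

-- sorting the combined list = sorted events ++ sorted scenarios
lemma pvSortedSplit (E S : List (String × String))
    (hE : ∀ p ∈ E, PySem.Str.startswith p.1 "-e" = true)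
    (hS : ∀ p ∈ S, PySem.Str.startswith p.1 "-s" = true)
    (hne : (E.map Prod.fst).Nodup) (hns : (S.map Prod.fst).Nodup) :
    PySem.List.sorted (S ++ E) (fun p => p.1) false
      = PySem.List.sorted E (fun p => p.1) false ++ PySem.List.sorted S (fun p => p.1) false := by
  have hperm : (PySem.List.sorted E (fun p => p.1) false ++ PySem.List.sorted S (fun p => p.1) false).Perm (S ++ E) :=
    ((PySem.List.sorted_perm E (fun p => p.1) false).append (PySem.List.sorted_perm S (fun p => p.1) false)).trans
      List.perm_append_comm
  have strict : ∀ (L : List (String × String)), (L.map Prod.fst).Nodup →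
      (PySem.List.sorted L (fun p => p.1) false).Pairwise (fun a b => a.1 < b.1) := by
    intro L hnd
    have hle := PySem.List.sorted_pairwise L (fun p => p.1)
    have hnd' : ((PySem.List.sorted L (fun p => p.1) false).map Prod.fst).Nodup :=
      (((PySem.List.sorted_perm L (fun p => p.1) false).map Prod.fst).nodup_iff).mpr hnd
    have hne' : (PySem.List.sorted L (fun p => p.1) false).Pairwise (fun a b => a.1 ≠ b.1) := by
      rw [List.nodup_iff_pairwise_ne, List.pairwise_map] at hnd'
      exact hnd'
    exact (hle.and hne').imp (fun h => lt_of_le_of_ne h.1 h.2)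
  have hpair : (PySem.List.sorted E (fun p => p.1) false ++ PySem.List.sorted S (fun p => p.1) false).Pairwise
      (fun a b : String × String => a.1 < b.1) := by
    rw [List.pairwise_append]
    refine ⟨strict E hne, strict S hns, ?_⟩
    intro a ha b hb
    exact pvELtS a.1 b.1 (hE a ((PySem.List.mem_sorted _ _ _ _).mp ha)) (hS b ((PySem.List.mem_sorted _ _ _ _).mp hb))
  exact PySem.List.sorted_eq_of_perm_of_pairwise_lt _ _ _ hperm hpair

-- Python setdefault = the explicit contains/insert pattern
lemma pvSetdefault (d : PySem.Dict String (List (String × String))) (k : String) :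
    d.setdefault k [] = if d.contains k then d else d.insert k [] := by
  by_cases h : d.contains k = true
  · rw [PySem.Dict.setdefault_of_contains _ _ h, if_pos h]
  · rw [PySem.Dict.setdefault_of_not_contains _ _ (by simpa using h), if_neg (by simpa using h)]

-- keys of Dict.ofList come from the input pairs
lemma pvOfListKey (l : List (String × String)) (p : String × String)
    (h : p ∈ (PySem.Dict.ofList l).items) : ∃ q ∈ l, q.1 = p.1 := by
  have h2 := PySem.Dict.mem_keys_of_mem_items (d := PySem.Dict.ofList l) h
  rw [show PySem.Dict.ofList l = l.foldl (fun d x => d.insert x.1 x.2) PySem.Dict.empty from rfl,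
    PySem.Dict.keys_foldl_insert_key] at h2
  have h3 : p.1 ∈ l.map Prod.fst := (PySem.List.mem_dedup _ _).mp h2
  obtain ⟨q, hq, hq1⟩ := List.mem_map.mp h3
  exact ⟨q, hq, hq1⟩

-- inserting the default 'scenario'/'event' keys does not change the two lookups
lemma pvGetDIf (d : PySem.Dict String (List (String × String))) (k k' : String) :
    (if d.contains k then d else d.insert k []).getD k' ([] : List (String × String))
      = d.getD k' ([] : List (String × String)) := by
  by_cases h : d.contains k = true
  · rw [if_pos h]
  · rw [if_neg (by simpa using h)]
    by_cases hk : k' = k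
    · subst hk
      rw [PySem.Dict.getD_insert_self, PySem.Dict.getD_of_not_contains _ _ (by simpa using h)]
    · rw [PySem.Dict.getD_insert_of_ne _ _ _ hk]

-- ===== VERDICT (by name: the statement is the Claim_ definition above) =====
theorem getSEResolvedFilename_spec : Claim_equal_getSEResolvedFilename := by
  intro filename se_vals _ hpre
  obtain ⟨hpS, hpE⟩ := hpre
  show getSEResolvedFilename filename se_vals = getSEResolvedFilename_alt filename se_vals
  unfold getSEResolvedFilename getSEResolvedFilename_alt
  rw [pvSetdefault, pvSetdefault]
  simp only [PySem.Dict.keys, PySem.Dict.values, List.map_map, List.zip_map', pvGetDIf,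
    Function.comp]
  set eRaw := (PySem.Dict.ofList se_vals).getD "event" ([] : List (String × String)) with heRaw
  set sRaw := (PySem.Dict.ofList se_vals).getD "scenario" ([] : List (String × String)) with hsRaw
  set E := (PySem.Dict.ofList eRaw).items.map (fun kv => ("-" ++ kv.1, kv.2)) with hE
  set S := (PySem.Dict.ofList sRaw).items.map (fun kv => ("-" ++ kv.1, kv.2)) with hS
  have hEsw : ∀ p ∈ E, PySem.Str.startswith p.1 "-e" = true := by
    intro p hp
    rw [hE] at hp
    obtain ⟨q, hq, rfl⟩ := List.mem_map.mp hp
    obtain ⟨r, hr, hr1⟩ := pvOfListKey _ _ hq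
    exact pvDashE q.1 (hr1 ▸ hpE r hr)
  have hSsw : ∀ p ∈ S, PySem.Str.startswith p.1 "-s" = true := by
    intro p hp
    rw [hS] at hp
    obtain ⟨q, hq, rfl⟩ := List.mem_map.mp hp
    obtain ⟨r, hr, hr1⟩ := pvOfListKey _ _ hq
    exact pvDashS q.1 (hr1 ▸ hpS r hr)
  have hinj : Function.Injective (fun a : String => "-" ++ a) :=
    fun a b h => (String.append_right_inj "-").mp h
  have hnodup : ∀ (l : List (String × String)),
      (((PySem.Dict.ofList l).items.map (fun kv => ("-" ++ kv.1, kv.2))).map Prod.fst).Nodup := by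
    intro l
    have hk := PySem.Dict.nodup_keys_ofList l
    simp only [PySem.Dict.keys] at hk
    have hm := hk.map hinj
    simpa [List.map_map, Function.comp] using hm
  rw [pvSortedSplit E S hEsw hSsw (by rw [hE]; exact hnodup eRaw) (by rw [hS]; exact hnodup sRaw),
    List.foldl_append]
  set stA := List.foldl (pvStepA filename (S ++ E)) (filename, false, "")
    (PySem.List.sorted E (fun x => x.1) false) with hstA
  set st1 := List.foldl (pvStepE filename) (filename, false)
    (PySem.List.sorted E (fun x => x.1) false) with hst1
  obtain ⟨h1, h2⟩ := pvELoop filename (S ++ E) (PySem.List.sorted E (fun x => x.1) false)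
    (fun p hp => hEsw p ((PySem.List.mem_sorted _ _ _ _).mp hp)) filename false ""
  rw [← hstA, ← hst1] at h1 h2
  have hfin := pvSLoop filename (S ++ E) st1.2 (PySem.List.sorted S (fun x => x.1) false)
    (fun p hp => hSsw p ((PySem.List.mem_sorted _ _ _ _).mp hp)) st1.1 true stA.2.2
  rw [Bool.and_true] at hfin
  rw [show stA = (stA.1, stA.2.1, stA.2.2) from rfl, h1, h2]
  exact hfin
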